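-- pv_equiv track=rewrite | github.com/dohaahi/Programmers | 프로그래머스/unrated/181874. A 강조하기/A 강조하기.py | solution
-- ===== SOURCE A (Python) =====
-- def solution(myString):
--     answer = ''
--
--     for s in myString:
--         if s == 'a' or s == 'A':
--             answer += s.upper()
--             continue
--         answer+= s.lower()
--
--     return answer
-- ===== SOURCE B (Python) =====
-- def solution(myString):
--     return myString.lower().replace('a', 'A')
-- ===== Notes on version B (the rewrite author's own statement) =====
-- stated objective: idiomatic
-- what changed: Replaces the per-character loop with its branch and string concatenation by two whole-string library passes: lowercase the entire string, then substitute the uppercase form of the target letter.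
import Mathlib
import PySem

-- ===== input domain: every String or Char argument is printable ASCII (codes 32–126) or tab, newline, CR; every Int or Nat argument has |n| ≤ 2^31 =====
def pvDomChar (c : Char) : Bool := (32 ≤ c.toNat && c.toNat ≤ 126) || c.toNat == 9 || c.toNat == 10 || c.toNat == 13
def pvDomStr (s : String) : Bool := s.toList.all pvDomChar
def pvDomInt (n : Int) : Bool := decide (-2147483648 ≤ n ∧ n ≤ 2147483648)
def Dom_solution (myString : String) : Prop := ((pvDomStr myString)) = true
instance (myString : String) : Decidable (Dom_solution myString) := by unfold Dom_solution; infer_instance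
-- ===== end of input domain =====

-- B: the per-character loop of A is replaced by two whole-string passes — lowercase all, then replace 'a' by 'A' (idiomatic).


-- ===== PORT A =====
-- answer is the accumulated character list; converted to String at the return, exact on the domain.
def solution (myString : String) : String :=
  String.ofList
    (myString.toList.foldl
      (fun answer s =>
        if s == 'a' || s == 'A' then answer ++ [PySem.Chars.upperChar s]
        else answer ++ [PySem.Chars.lowerChar s])
      [])

-- ===== PORT B =====
def solution_alt (myString : String) : String :=
  PySem.Str.replace (PySem.Str.lower myString) "a" "A"

-- ===== PRECONDITION & SPEC =====
def Spec_solution (myString : String) (out : String) : Prop := out = solution_alt myString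
instance (myString : String) (out : String) : Decidable (Spec_solution myString out) := by unfold Spec_solution; infer_instance

-- ===== CLAIM (what is proved, stated in full; the proofs are below) =====
def Claim_equal_solution : Prop := ∀ (myString : String), Dom_solution myString → Spec_solution myString (solution myString)

-- ===== LEMMAS AND PROOFS =====

-- A's per-character step, as a pure function on the character
def aStep (c : Char) : Char :=
  if c == 'a' || c == 'A' then PySem.Chars.upperChar c else PySem.Chars.lowerChar c

theorem foldl_aStep (l : List Char) (acc : List Char) :
    l.foldl
      (fun answer s =>
        if s == 'a' || s == 'A' then answer ++ [PySem.Chars.upperChar s]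
        else answer ++ [PySem.Chars.lowerChar s])
      acc = acc ++ l.map aStep := by
  induction l generalizing acc with
  | nil => simp
  | cons c t ih =>
      simp only [List.foldl_cons, List.map_cons, ih, aStep]
      split <;> simp

-- replace.go with single-char old 'a' and fuel = length is a map
theorem replace_go_a (l : List Char) (acc : List Char) :
    PySem.Chars.replace.go ['a'] ['A'] l.length l acc =
      acc.reverse ++ l.map (fun c => if c = 'a' then 'A' else c) := by
  induction l generalizing acc with
  | nil =>
      rw [List.length_nil, PySem.Chars.replace.go.eq_def]
      simp
  | cons c t ih =>
      rw [List.length_cons, PySem.Chars.replace.go.eq_def]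
      by_cases h : c = 'a'
      · subst h
        simp only [List.isPrefixOf, beq_self_eq_true, Bool.true_and, if_true,
          List.length_cons, List.drop_succ_cons]
        simp only [List.length_nil, List.drop_zero]
        rw [ih]
        simp
      · have hpre : List.isPrefixOf ['a'] (c :: t) = false := by
          simp [List.isPrefixOf, Ne.symm h]
        simp only [hpre, Bool.false_eq_true, if_false]
        rw [ih]
        simp [h]

-- on any character, lowercase-then-replace-'a' equals A's per-character branch
theorem char_fact (c : Char) :
    (if PySem.Chars.lowerChar c = 'a' then 'A' else PySem.Chars.lowerChar c) = aStep c := by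
  by_cases ha : c = 'a'
  · subst ha; decide
  · by_cases hA : c = 'A'
    · subst hA; decide
    · unfold aStep
      have hban : (c == 'a' || c == 'A') = false := by simp [ha, hA]
      rw [hban]
      simp only [Bool.false_eq_true, if_false]
      have hne : PySem.Chars.lowerChar c ≠ 'a' := by
        unfold PySem.Chars.lowerChar PySem.Chars.isupper
        split
        · rename_i hu
          simp only [Bool.and_eq_true, decide_eq_true_eq] at hu
          intro hcontra
          have hc90 : c.toNat ≤ 90 := Fin.mk_le_mk.mp hu.2
          have hvalid : Nat.isValidChar (c.toNat + 32) := Or.inl (by omega)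
          have hval : (Char.ofNat (c.toNat + 32)).toNat = c.toNat + 32 := by
            rw [Char.ofNat, dif_pos hvalid]
            exact Char.toNat_ofNatAux hvalid
          have h97 : (('a' : Char)).toNat = c.toNat + 32 := by rw [← hcontra, hval]
          have h65 : c.toNat = ('A' : Char).toNat := by
            have ha97 : ('a' : Char).toNat = 97 := by decide
            have hA65 : ('A' : Char).toNat = 65 := by decide
            omega
          exact hA (Char.ext (UInt32.toNat_inj.mp h65))
        · exact ha
      simp [hne]

-- ===== VERDICT (by name: the statement is the Claim_ definition above) =====
theorem solution_spec : Claim_equal_solution := by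
  intro s hdom
  unfold Spec_solution solution solution_alt
  rw [foldl_aStep, List.nil_append]
  unfold PySem.Str.replace PySem.Str.lower
  congr 1
  have htl : (String.ofList (PySem.Chars.lower s.toList)).toList = PySem.Chars.lower s.toList := by
    simp
  rw [htl]
  have ha : ("a" : String).toList = ['a'] := by decide
  have hAA : ("A" : String).toList = ['A'] := by decide
  rw [ha, hAA]
  unfold PySem.Chars.replace
  rw [if_neg (by decide)]
  have hlen : (PySem.Chars.lower s.toList).length = s.toList.length := by
    simp [PySem.Chars.lower]
  rw [hlen]
  have hgo := replace_go_a (PySem.Chars.lower s.toList)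
  rw [hlen] at hgo
  rw [hgo []]
  simp only [List.reverse_nil, List.nil_append]
  unfold PySem.Chars.lower
  rw [List.map_map]
  apply (List.map_congr_left ?_).symm
  intro c _
  show (if PySem.Chars.lowerChar c = 'a' then 'A' else PySem.Chars.lowerChar c) = aStep c
  exact char_fact c
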